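-- pv_equiv track=rewrite | github.com/sorendunn/Agentless-Lite | agentless_lite/util/utils.py | find_consecutive_subset
-- ===== SOURCE A (Python) =====
-- def find_consecutive_subset(numbers, x, no_start):
--     numbers = sorted(list(set(numbers)))
--
--     for i in range(len(numbers) - x + 1):
--         sequence = numbers[i : i + x]
--
--         if sequence[0] in no_start or sequence[-1] in no_start:
--             continue
--
--         if sequence == list(range(sequence[0], sequence[0] + x)):
--             return sequence
--
--     return None  # Return None if no consecutive subset is found
-- ===== SOURCE B (Python) =====
-- def find_consecutive_subset(numbers, x, no_start):
--     nums = sorted(set(numbers))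
--     bad = set(no_start)
--     n = len(nums)
--     i = 0
--     while i < n:
--         # extend to the end of the maximal run of consecutive values starting at index i
--         j = i
--         while j + 1 < n and nums[j + 1] == nums[j] + 1:
--             j += 1
--         # candidate window starts inside this run, scanned as integer values
--         for s in range(nums[i], nums[j] - x + 2):
--             if s not in bad and s + x - 1 not in bad:
--                 return list(range(s, s + x))
--         i = j + 1
--     return None
-- ===== Notes on version B (the rewrite author's own statement) =====
-- stated objective: alternative
-- what changed: B decomposes the sorted deduplicated values into maximal runs of consecutive integers and, inside each run, scans candidate start VALUES arithmetically with O(1) set-membership tests, instead of A's sliding index window that materialises each x-long slice and compares it elementwise against list(range(...)).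
-- outside the precondition, e.g. on find_consecutive_subset([1, 2, 3], 0, set()): A raises IndexError, B returns []
import Mathlib
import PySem

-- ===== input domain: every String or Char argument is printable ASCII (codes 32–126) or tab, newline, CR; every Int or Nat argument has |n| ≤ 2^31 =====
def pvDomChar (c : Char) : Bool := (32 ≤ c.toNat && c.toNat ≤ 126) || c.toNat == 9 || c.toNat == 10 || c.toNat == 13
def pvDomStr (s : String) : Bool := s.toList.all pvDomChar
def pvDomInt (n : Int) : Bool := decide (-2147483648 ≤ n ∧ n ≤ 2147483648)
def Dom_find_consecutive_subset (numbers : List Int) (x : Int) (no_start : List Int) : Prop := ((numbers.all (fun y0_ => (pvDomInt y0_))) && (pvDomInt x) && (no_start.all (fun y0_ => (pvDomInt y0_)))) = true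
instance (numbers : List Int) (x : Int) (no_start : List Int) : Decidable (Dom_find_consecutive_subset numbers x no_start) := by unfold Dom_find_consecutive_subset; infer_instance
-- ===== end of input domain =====

-- B decomposes the sorted deduplicated values into maximal runs of consecutive integers and scans
-- candidate window start VALUES arithmetically inside each run, instead of A's sliding index window
-- that materialises each x-long slice and compares it elementwise against list(range(...)).

-- ===== PORT A =====
-- the for-loop of A over the index list, with early return
def fcsLoopA (nums : List Int) (x : Int) (no_start : List Int) : List Int → Option (List Int)
  | [] => none
  | i :: rest =>
    match PySem.List.pyGet? (PySem.List.slice nums (some i) (some (i + x))) 0,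
          PySem.List.pyGet? (PySem.List.slice nums (some i) (some (i + x))) (-1) with
    | some s0, some sl =>
      if no_start.contains s0 || no_start.contains sl then fcsLoopA nums x no_start rest
      else if PySem.List.slice nums (some i) (some (i + x)) = PySem.List.pyRange s0 (s0 + x) 1 then
        some (PySem.List.slice nums (some i) (some (i + x)))
      else fcsLoopA nums x no_start rest
    | _, _ => none  -- sequence[0] / sequence[-1] raise IndexError in Python (only when x ≤ 0)

def find_consecutive_subset (numbers : List Int) (x : Int) (no_start : List Int) : Option (List Int) :=
  let nums := PySem.List.sorted (PySem.Set.ofList numbers) (fun y => y)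
  fcsLoopA nums x no_start (PySem.List.pyRange 0 ((nums.length : Int) - x + 1) 1)

-- ===== PORT B =====
-- the inner `while j + 1 < n and nums[j+1] == nums[j] + 1: j += 1` of B
def runEnd (nums : List Int) (j : Nat) : Nat :=
  if h : j + 1 < nums.length ∧ nums.getD (j + 1) 0 = nums.getD j 0 + 1 then runEnd nums (j + 1)
  else j
termination_by nums.length - j
decreasing_by omega

-- needed by runLoop's termination
lemma runEnd_ge (nums : List Int) (j : Nat) : j ≤ runEnd nums j := by
  fun_induction runEnd nums j with
  | case1 j h ih => omega
  | case2 j h => omega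

-- the inner `for s in range(nums[i], nums[j] - x + 2): if s not in bad and s + x - 1 not in bad: return ...`
def scanStarts (x : Int) (bad : List Int) : List Int → Option (List Int)
  | [] => none
  | s :: rest =>
    if !(bad.contains s) && !(bad.contains (s + x - 1)) then
      some (PySem.List.pyRange s (s + x) 1)
    else scanStarts x bad rest

-- the outer `while i < n` of B; runEnd nums i is B's j
def runLoop (nums : List Int) (x : Int) (bad : List Int) (i : Nat) : Option (List Int) :=
  if h : i < nums.length then
    match scanStarts x bad
        (PySem.List.pyRange (nums.getD i 0) (nums.getD (runEnd nums i) 0 - x + 2) 1) with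
    | some r => some r
    | none => runLoop nums x bad (runEnd nums i + 1)
  else none
termination_by nums.length - i
decreasing_by have := runEnd_ge nums i; omega

def find_consecutive_subset_alt (numbers : List Int) (x : Int) (no_start : List Int) : Option (List Int) :=
  let nums := PySem.List.sorted (PySem.Set.ofList numbers) (fun y => y)
  runLoop nums x (PySem.Set.ofList no_start) 0

-- ===== PRECONDITION & SPEC =====
-- Pre_ excludes exactly x ≤ 0, where A raises IndexError (sequence[0] on an empty window slice).
def Pre_find_consecutive_subset (numbers : List Int) (x : Int) (no_start : List Int) : Prop := 1 ≤ x
instance (numbers : List Int) (x : Int) (no_start : List Int) : Decidable (Pre_find_consecutive_subset numbers x no_start) := by unfold Pre_find_consecutive_subset; infer_instance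

def pvWitness_find_consecutive_subset : List Int × Int × List Int := ([3, 1, 2, 7], 2, [1])

def Spec_find_consecutive_subset (numbers : List Int) (x : Int) (no_start : List Int) (out : Option (List Int)) : Prop := out = find_consecutive_subset_alt numbers x no_start
instance (numbers : List Int) (x : Int) (no_start : List Int) (out : Option (List Int)) : Decidable (Spec_find_consecutive_subset numbers x no_start out) := by unfold Spec_find_consecutive_subset; infer_instance

-- ===== CLAIM (what is proved, stated in full; the proofs are below) =====
def Claim_equal_find_consecutive_subset : Prop := ∀ (numbers : List Int) (x : Int) (no_start : List Int), Dom_find_consecutive_subset numbers x no_start → Pre_find_consecutive_subset numbers x no_start → Spec_find_consecutive_subset numbers x no_start (find_consecutive_subset numbers x no_start)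

-- ===== LEMMAS AND PROOFS =====

-- proof-only reference loop: A's scan re-expressed on Nat indices with the O(1) endpoint test
def refLoop (nums : List Int) (x : Int) (bad : List Int) (p : Nat) : Option (List Int) :=
  if p + x.toNat ≤ nums.length ∧ 1 ≤ x then
    if bad.contains (nums.getD p 0) || bad.contains (nums.getD (p + x.toNat - 1) 0) then
      refLoop nums x bad (p + 1)
    else if nums.getD (p + x.toNat - 1) 0 = nums.getD p 0 + x - 1 then
      some (PySem.List.pyRange (nums.getD p 0) (nums.getD p 0 + x) 1)
    else refLoop nums x bad (p + 1)
  else none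
termination_by nums.length + 1 - p
decreasing_by all_goals omega

lemma getD_eq_of_getElem? (nums : List Int) (k : Nat) (a : Int) (h : nums[k]? = some a) :
    nums.getD k 0 = a := by
  simp [List.getD_eq_getElem?_getD, h]

-- the last element of a strictly increasing integer list headed by c is at least c + (length - 1)
lemma pw_last_ge (t : List Int) : ∀ c : Int, (c :: t).Pairwise (· < ·) →
    c + t.length ≤ (c :: t).getLast (by simp) := by
  induction t with
  | nil => intro c _; simp
  | cons d t' ih =>
    intro c hp
    obtain ⟨hhead, htail⟩ := List.pairwise_cons.mp hp
    have hcd : c < d := hhead d (by simp)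
    have := ih d htail
    rw [List.getLast_cons (by simp : (d :: t') ≠ [])]
    simp only [List.length_cons]
    push_cast at this ⊢
    omega

-- a strictly increasing integer list headed by c equals range(c, c + length) iff its last element is c + length - 1
lemma pw_eq_range_iff (t : List Int) : ∀ c : Int, (c :: t).Pairwise (· < ·) →
    ((c :: t).getLast (by simp) = c + t.length ↔
      c :: t = PySem.List.pyRange c (c + t.length + 1) 1) := by
  induction t with
  | nil =>
    intro c _
    simp [PySem.List.pyRange_one_singleton]
  | cons d t' ih =>
    intro c hp
    obtain ⟨hhead, htail⟩ := List.pairwise_cons.mp hp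
    have hcd : c < d := hhead d (by simp)
    rw [List.getLast_cons (by simp : (d :: t') ≠ [])]
    have hbound : c + ((d :: t').length : Int) + 1 = (c + 1) + ((t'.length : Int) + 1) := by
      simp only [List.length_cons]; push_cast; ring
    rw [hbound]
    rw [PySem.List.pyRange_one_cons (by omega)]
    constructor
    · intro h
      have hge := pw_last_ge t' d htail
      have hd : d = c + 1 := by
        simp only [List.length_cons] at h
        push_cast at h
        omega
      subst hd
      rw [List.cons_inj_right,
        show (c + 1) + ((t'.length : Int) + 1) = (c + 1) + (t'.length : Int) + 1 from by ring]
      apply (ih (c + 1) htail).mp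
      simp only [List.length_cons] at h
      push_cast at h ⊢
      omega
    · intro h
      rw [List.cons_inj_right] at h
      have hd : d = c + 1 := by
        have hlt : c + 1 < (c + 1) + ((t'.length : Int) + 1) := by omega
        rw [PySem.List.pyRange_one_cons hlt] at h
        exact (List.cons_eq_cons.mp h).1
      subst hd
      have hb2 : (c + 1) + ((t'.length : Int) + 1) = (c + 1) + (t'.length : Int) + 1 := by ring
      rw [hb2] at h
      have := (ih (c + 1) htail).mpr h
      simp only [List.length_cons]
      push_cast at this ⊢
      omega

-- everything A's loop step needs to know about one window of the sorted deduplicated list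
lemma window_spec (nums : List Int) (x i : Int) (hx : 1 ≤ x) (hi0 : 0 ≤ i)
    (hix : i + x ≤ (nums.length : Int)) (hs : nums.Pairwise (· < ·)) :
    ∃ (a l : Int) (t : List Int),
      PySem.List.slice nums (some i) (some (i + x)) = a :: t ∧
      PySem.List.pyGet? nums i = some a ∧
      PySem.List.pyGet? nums (i + x - 1) = some l ∧
      PySem.List.pyGet? (a :: t) 0 = some a ∧
      PySem.List.pyGet? (a :: t) (-1) = some l ∧
      ((a :: t = PySem.List.pyRange a (a + x) 1) ↔ l = a + x - 1) := by
  have hslice : PySem.List.slice nums (some i) (some (i + x)) =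
      List.take ((i + x).toNat - i.toNat) (List.drop i.toNat nums) :=
    PySem.List.slice_of_nonneg nums hi0 (by omega) (by omega) hix
  have hlen : (List.take ((i + x).toNat - i.toNat) (List.drop i.toNat nums)).length = x.toNat := by
    simp only [List.length_take, List.length_drop]
    omega
  cases hw : List.take ((i + x).toNat - i.toNat) (List.drop i.toNat nums) with
  | nil => rw [hw] at hlen; simp at hlen; omega
  | cons a t =>
  rw [hw] at hlen
  have hlen' : t.length = x.toNat - 1 := by simp at hlen; omega
  have hget : ∀ k : Nat, k < x.toNat → (a :: t)[k]? = nums[i.toNat + k]? := by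
    intro k hk
    rw [← hw, List.getElem?_take_of_lt (by omega), List.getElem?_drop]
  have ha : nums[i.toNat]? = some a := by
    have h0 := (hget 0 (by omega)).symm
    simp only [Nat.add_zero] at h0
    rw [h0]
    simp
  have hl : nums[i.toNat + (x.toNat - 1)]? = some ((a :: t).getLast (by simp)) := by
    rw [← hget (x.toNat - 1) (by omega)]
    rw [List.getElem?_eq_getElem (by simp only [List.length_cons]; omega)]
    rw [List.getLast_eq_getElem (by simp : (a :: t) ≠ [])]
    simp only [List.length_cons, Nat.add_sub_cancel, Option.some.injEq]
    congr 1
    omega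
  refine ⟨a, (a :: t).getLast (by simp), t, hslice.trans hw, ?_, ?_, ?_, ?_, ?_⟩
  · rw [show i = ((i.toNat : Nat) : Int) from (Int.toNat_of_nonneg hi0).symm,
      PySem.List.pyGet?_natCast, ha]
  · rw [show i + x - 1 = ((i.toNat + (x.toNat - 1) : Nat) : Int) from by push_cast; omega,
      PySem.List.pyGet?_natCast, hl]
  · have h0 := PySem.List.pyGet?_natCast (a :: t) 0
    simp only [Nat.cast_zero] at h0
    rw [h0]
    simp
  · have hne : (a :: t) ≠ [] := by simp
    conv_lhs => rw [(List.dropLast_append_getLast hne).symm]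
    rw [PySem.List.pyGet?_neg_one_append_singleton]
  · have hp : (a :: t).Pairwise (· < ·) := by
      rw [← hw]
      have hdrop : (List.drop i.toNat nums).Pairwise (· < ·) := hs.drop
      exact hdrop.take
    have htl : (t.length : Int) = x - 1 := by
      push_cast [hlen']
      omega
    have hkey := pw_eq_range_iff t a hp
    rw [htl, show a + (x - 1) + 1 = a + x from by ring] at hkey
    constructor
    · intro h
      have := hkey.mpr h
      omega
    · intro h
      exact hkey.mp (by omega)

-- A's loop over the index range equals the reference loop (any bad-list with the same contains)
lemma loopA_eq_ref (nums : List Int) (x : Int) (bad bad2 : List Int) (hx : 1 ≤ x)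
    (hs : nums.Pairwise (· < ·)) (hbad : ∀ a : Int, bad2.contains a = bad.contains a) :
    ∀ m p : Nat, nums.length + 1 - p ≤ m →
      fcsLoopA nums x bad (PySem.List.pyRange (p : Int) ((nums.length : Int) - x + 1) 1) =
        refLoop nums x bad2 p := by
  intro m
  induction m with
  | zero =>
    intro p hp
    have hge : nums.length < p := by omega
    rw [PySem.List.pyRange_one_eq_nil (by push_cast; omega), refLoop, if_neg (by omega)]
    rfl
  | succ m ih =>
    intro p hp
    by_cases hpx : p + x.toNat ≤ nums.length
    · have hlt : (p : Int) < (nums.length : Int) - x + 1 := by omega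
      rw [PySem.List.pyRange_one_cons hlt]
      obtain ⟨a, l, t, hseq, hna, hnl, hg0, hg1, hiff⟩ :=
        window_spec nums x (p : Int) hx (by positivity) (by omega) hs
      have hag : nums.getD p 0 = a := by
        apply getD_eq_of_getElem?
        simpa using hna
      have hlg : nums.getD (p + x.toNat - 1) 0 = l := by
        apply getD_eq_of_getElem?
        have hidx : (p : Int) + x - 1 = ((p + x.toNat - 1 : Nat) : Int) := by push_cast; omega
        rw [hidx, PySem.List.pyGet?_natCast] at hnl
        exact hnl
      have hrest : fcsLoopA nums x bad (PySem.List.pyRange ((p : Int) + 1) ((nums.length : Int) - x + 1) 1)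
          = refLoop nums x bad2 (p + 1) := by
        have := ih (p + 1) (by omega)
        rwa [show (((p + 1 : Nat)) : Int) = (p : Int) + 1 from by push_cast; ring] at this
      rw [fcsLoopA, hseq, hg0, hg1, refLoop, if_pos ⟨hpx, hx⟩, hag, hlg, hbad, hbad]
      simp only []
      by_cases hb : (bad.contains a || bad.contains l) = true
      · rw [if_pos hb, if_pos hb, hrest]
      · rw [if_neg hb, if_neg hb]
        by_cases hc : l = a + x - 1
        · rw [if_pos (hiff.mpr hc), if_pos hc, hiff.mpr hc]
        · rw [if_neg (fun h => hc (hiff.mp h)), if_neg hc, hrest]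
    · rw [PySem.List.pyRange_one_eq_nil (by omega), refLoop, if_neg (by omega)]
      rfl

-- strictly increasing lists grow at least by one per step
lemma sorted_getD_add_le (nums : List Int) (hs : nums.Pairwise (· < ·)) (u : Nat) :
    ∀ v : Nat, u ≤ v → v < nums.length →
      nums.getD u 0 + ((v : Int) - (u : Int)) ≤ nums.getD v 0 := by
  intro v
  induction v with
  | zero =>
    intro h1 h2
    have hu : u = 0 := by omega
    subst hu
    simp
  | succ w ihw =>
    intro h1 h2
    rcases Nat.lt_or_ge u (w + 1) with h | h
    · have hlt : nums[w] < nums[w + 1] :=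
        List.pairwise_iff_getElem.mp hs w (w + 1) (by omega) h2 (by omega)
      have hw := ihw (by omega) (by omega)
      have e1 : nums.getD w 0 = nums[w] := by
        simp [List.getD_eq_getElem?_getD, List.getElem?_eq_getElem (show w < nums.length by omega)]
      have e2 : nums.getD (w + 1) 0 = nums[w + 1] := by
        simp [List.getD_eq_getElem?_getD, List.getElem?_eq_getElem h2]
      rw [e1] at hw
      rw [e2]
      push_cast
      omega
    · have hu : u = w + 1 := by omega
      subst hu
      simp
  termination_by v => v

-- with a non-unit gap right after index j, the growth from u ≤ j to v ≥ j+1 is at least (v - u) + 1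
lemma sorted_getD_gap (nums : List Int) (hs : nums.Pairwise (· < ·)) (u j v : Nat)
    (hu : u ≤ j) (hjv : j + 1 ≤ v) (hv : v < nums.length)
    (hgap : nums.getD (j + 1) 0 ≠ nums.getD j 0 + 1) :
    nums.getD u 0 + ((v : Int) - (u : Int)) + 1 ≤ nums.getD v 0 := by
  have h1 := sorted_getD_add_le nums hs u j hu (by omega)
  have h2 := sorted_getD_add_le nums hs (j + 1) v hjv hv
  have hlt : nums[j] < nums[j + 1] :=
    List.pairwise_iff_getElem.mp hs j (j + 1) (by omega) (by omega) (by omega)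
  have e1 : nums.getD j 0 = nums[j] := by
    simp [List.getD_eq_getElem?_getD, List.getElem?_eq_getElem (show j < nums.length by omega)]
  have e2 : nums.getD (j + 1) 0 = nums[j + 1] := by
    simp [List.getD_eq_getElem?_getD, List.getElem?_eq_getElem (show j + 1 < nums.length by omega)]
  rw [e1, e2] at hgap
  rw [e1] at h1
  rw [e2] at h2
  push_cast at h1 h2 ⊢
  omega

-- what runEnd computes: it stays in range and delimits the maximal consecutive run
lemma runEnd_spec (nums : List Int) : ∀ i : Nat, i < nums.length →
    runEnd nums i < nums.length ∧
    (∀ k : Nat, i ≤ k → k ≤ runEnd nums i →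
      nums.getD k 0 = nums.getD i 0 + ((k : Int) - (i : Int))) ∧
    (runEnd nums i + 1 < nums.length →
      nums.getD (runEnd nums i + 1) 0 ≠ nums.getD (runEnd nums i) 0 + 1) := by
  intro i
  fun_induction runEnd nums i with
  | case1 j h ih =>
    intro _
    obtain ⟨hlen, hrun, hgap⟩ := ih h.1
    refine ⟨hlen, ?_, hgap⟩
    intro k hk1 hk2
    rcases Nat.lt_or_ge j k with hjk | hjk
    · have := hrun k (by omega) hk2
      rw [this, h.2]
      push_cast
      ring
    · have hkj : k = j := by omega
      subst hkj
      simp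
  | case2 j h =>
    intro hj
    refine ⟨hj, ?_, ?_⟩
    · intro k hk1 hk2
      have : k = j := by omega
      subst this
      simp
    · intro hlen
      rw [Decidable.not_and_iff_or_not] at h
      rcases h with h | h
      · omega
      · exact h

-- inside a run [i, j], the reference loop from p equals the value scan over the remaining starts
lemma ref_scan (nums : List Int) (x : Int) (bad : List Int) (hx : 1 ≤ x)
    (hs : nums.Pairwise (· < ·)) (i j : Nat) (hij : i ≤ j) (hj : j < nums.length)
    (hrun : ∀ k : Nat, i ≤ k → k ≤ j →
      nums.getD k 0 = nums.getD i 0 + ((k : Int) - (i : Int)))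
    (hgap : j + 1 < nums.length → nums.getD (j + 1) 0 ≠ nums.getD j 0 + 1) :
    ∀ m p : Nat, j + 1 - p ≤ m → i ≤ p → p ≤ j + 1 →
      refLoop nums x bad p =
        (match scanStarts x bad
            (PySem.List.pyRange (nums.getD i 0 + ((p : Int) - (i : Int)))
              (nums.getD i 0 + ((j : Int) - (i : Int)) - x + 2) 1) with
         | some r => some r
         | none => refLoop nums x bad (j + 1)) := by
  intro m
  induction m with
  | zero =>
    intro p hm h1 h2
    have hp : p = j + 1 := by omega
    subst hp
    rw [PySem.List.pyRange_one_eq_nil (by push_cast; omega)]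
    rfl
  | succ m ih =>
    intro p hm h1 h2
    by_cases hpj : p = j + 1
    · subst hpj
      rw [PySem.List.pyRange_one_eq_nil (by push_cast; omega)]
      rfl
    · have hpj' : p ≤ j := by omega
      by_cases hfit : p + x.toNat ≤ j + 1
      · -- window fits inside the run: one real scan step
        have hne : nums.getD i 0 + ((p : Int) - (i : Int)) <
            nums.getD i 0 + ((j : Int) - (i : Int)) - x + 2 := by omega
        rw [PySem.List.pyRange_one_cons hne, scanStarts]
        have hgp : nums.getD p 0 = nums.getD i 0 + ((p : Int) - (i : Int)) := hrun p h1 hpj'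
        have hgl : nums.getD (p + x.toNat - 1) 0 =
            nums.getD i 0 + ((p : Int) - (i : Int)) + x - 1 := by
          have := hrun (p + x.toNat - 1) (by omega) (by omega)
          rw [this]
          push_cast
          omega
        rw [refLoop, if_pos ⟨by omega, hx⟩, hgp, hgl]
        have hrest : refLoop nums x bad (p + 1) =
            (match scanStarts x bad
                (PySem.List.pyRange (nums.getD i 0 + ((p : Int) - (i : Int)) + 1)
                  (nums.getD i 0 + ((j : Int) - (i : Int)) - x + 2) 1) with
             | some r => some r
             | none => refLoop nums x bad (j + 1)) := by
          have := ih (p + 1) (by omega) (by omega) (by omega)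
          rwa [show nums.getD i 0 + (((p + 1 : Nat) : Int) - (i : Int)) =
              nums.getD i 0 + ((p : Int) - (i : Int)) + 1 from by push_cast; ring] at this
        by_cases hc1 : bad.contains (nums.getD i 0 + ((p : Int) - (i : Int))) = true <;>
          by_cases hc2 : bad.contains (nums.getD i 0 + ((p : Int) - (i : Int)) + x - 1) = true
        · rw [if_pos (show (bad.contains (nums.getD i 0 + ((p : Int) - (i : Int))) ||
              bad.contains (nums.getD i 0 + ((p : Int) - (i : Int)) + x - 1)) = true by
                rw [hc1, Bool.true_or]),
            if_neg (show ¬ ((!(bad.contains (nums.getD i 0 + ((p : Int) - (i : Int)))) &&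
              !(bad.contains (nums.getD i 0 + ((p : Int) - (i : Int)) + x - 1))) = true) by
                intro hcc; rw [hc1] at hcc; simp at hcc)]
          exact hrest
        · rw [if_pos (show (bad.contains (nums.getD i 0 + ((p : Int) - (i : Int))) ||
              bad.contains (nums.getD i 0 + ((p : Int) - (i : Int)) + x - 1)) = true by
                rw [hc1, Bool.true_or]),
            if_neg (show ¬ ((!(bad.contains (nums.getD i 0 + ((p : Int) - (i : Int)))) &&
              !(bad.contains (nums.getD i 0 + ((p : Int) - (i : Int)) + x - 1))) = true) by
                intro hcc; rw [hc1] at hcc; simp at hcc)]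
          exact hrest
        · rw [if_pos (show (bad.contains (nums.getD i 0 + ((p : Int) - (i : Int))) ||
              bad.contains (nums.getD i 0 + ((p : Int) - (i : Int)) + x - 1)) = true by
                rw [hc2, Bool.or_true]),
            if_neg (show ¬ ((!(bad.contains (nums.getD i 0 + ((p : Int) - (i : Int)))) &&
              !(bad.contains (nums.getD i 0 + ((p : Int) - (i : Int)) + x - 1))) = true) by
                intro hcc; rw [hc2] at hcc; simp at hcc)]
          exact hrest
        · rw [Bool.not_eq_true] at hc1 hc2
          rw [if_neg (show ¬ ((bad.contains (nums.getD i 0 + ((p : Int) - (i : Int))) ||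
              bad.contains (nums.getD i 0 + ((p : Int) - (i : Int)) + x - 1)) = true) by
                intro hcc; rw [hc1, hc2] at hcc; simp at hcc),
            if_pos (show nums.getD i 0 + ((p : Int) - (i : Int)) + x - 1 =
              nums.getD i 0 + ((p : Int) - (i : Int)) + x - 1 from rfl),
            if_pos (show ((!(bad.contains (nums.getD i 0 + ((p : Int) - (i : Int)))) &&
              !(bad.contains (nums.getD i 0 + ((p : Int) - (i : Int)) + x - 1))) = true) by
                rw [hc1, hc2]; rfl)]
      · -- window crosses the end of the run: empty scan range, refLoop skips to j + 1
        rw [PySem.List.pyRange_one_eq_nil (by omega)]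
        show refLoop nums x bad p = refLoop nums x bad (j + 1)
        by_cases hg : p + x.toNat ≤ nums.length
        · have hq : p + x.toNat - 1 < nums.length := by omega
          have hjq : j + 1 ≤ p + x.toNat - 1 := by omega
          have hcross : nums.getD p 0 + x ≤ nums.getD (p + x.toNat - 1) 0 := by
            have := sorted_getD_gap nums hs p j (p + x.toNat - 1) hpj' hjq hq
              (hgap (by omega))
            push_cast at this ⊢
            omega
          have hskip : refLoop nums x bad p = refLoop nums x bad (p + 1) := by
            rw [refLoop, if_pos ⟨hg, hx⟩]
            by_cases hb : (bad.contains (nums.getD p 0) ||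
                bad.contains (nums.getD (p + x.toNat - 1) 0)) = true
            · rw [if_pos hb]
            · rw [if_neg hb, if_neg (by omega)]
          rw [hskip]
          have := ih (p + 1) (by omega) (by omega) (by omega)
          rw [PySem.List.pyRange_one_eq_nil (by push_cast; omega)] at this
          exact this
        · rw [refLoop, if_neg (by omega), refLoop, if_neg (by omega)]
  termination_by m => m

-- the reference loop equals B's run loop
lemma ref_eq_run (nums : List Int) (x : Int) (bad : List Int) (hx : 1 ≤ x)
    (hs : nums.Pairwise (· < ·)) :
    ∀ m i : Nat, nums.length - i ≤ m → refLoop nums x bad i = runLoop nums x bad i := by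
  intro m
  induction m with
  | zero =>
    intro i hm
    have hi : nums.length ≤ i := by omega
    rw [refLoop, if_neg (by omega), runLoop, dif_neg (by omega)]
  | succ m ih =>
    intro i hm
    by_cases hi : i < nums.length
    · obtain ⟨hjlen, hrun, hgap⟩ := runEnd_spec nums i hi
      have hij : i ≤ runEnd nums i := runEnd_ge nums i
      have hmain := ref_scan nums x bad hx hs i (runEnd nums i) hij hjlen hrun hgap
        (runEnd nums i + 1) i (by omega) (le_refl i) (by omega)
      rw [runLoop, dif_pos hi]
      have hstart : nums.getD i 0 + ((i : Int) - (i : Int)) = nums.getD i 0 := by ring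
      have hend : nums.getD i 0 + (((runEnd nums i : Nat) : Int) - (i : Int)) =
          nums.getD (runEnd nums i) 0 := (hrun (runEnd nums i) hij (le_refl _)).symm
      rw [hstart, hend] at hmain
      rw [hmain]
      cases hsc : scanStarts x bad
          (PySem.List.pyRange (nums.getD i 0) (nums.getD (runEnd nums i) 0 - x + 2) 1) with
      | some r => rfl
      | none =>
        simp only []
        exact ih (runEnd nums i + 1) (by omega)
    · rw [refLoop, if_neg (by omega), runLoop, dif_neg hi]

-- membership in the deduplicated set agrees with the original list
lemma contains_ofList (l : List Int) (a : Int) :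
    (PySem.Set.ofList l).contains a = l.contains a := by
  simp [List.contains_iff_mem, PySem.Set.mem_ofList]

-- ===== VERDICT (by name: the statement is the Claim_ definition above) =====
theorem find_consecutive_subset_spec : Claim_equal_find_consecutive_subset := by
  intro numbers x no_start _ hpre
  unfold Spec_find_consecutive_subset find_consecutive_subset find_consecutive_subset_alt
  have hs : (PySem.List.sorted (PySem.Set.ofList numbers) (fun y => y)).Pairwise (· < ·) :=
    PySem.List.sorted_ofList_pairwise_lt numbers
  have h1 := loopA_eq_ref (PySem.List.sorted (PySem.Set.ofList numbers) (fun y => y)) x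
    no_start (PySem.Set.ofList no_start) hpre hs (contains_ofList no_start)
    ((PySem.List.sorted (PySem.Set.ofList numbers) (fun y => y)).length + 1) 0 (by omega)
  have h2 := ref_eq_run (PySem.List.sorted (PySem.Set.ofList numbers) (fun y => y)) x
    (PySem.Set.ofList no_start) hpre hs
    ((PySem.List.sorted (PySem.Set.ofList numbers) (fun y => y)).length) 0 (by omega)
  simp only [Nat.cast_zero] at h1
  rw [h1, h2]
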